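-- pv_equiv track=rewrite | github.com/drpacman/advent-of-code-2020 | day20/day20.py | convert_number_to_line
-- ===== SOURCE A (Python) =====
-- def convert_number_to_line(number):
--     line = ''
--     for _ in range(10):
--         if (number & 1) == 1:
--             line = '#' + line
--         else:
--             line = '.' + line
--         number = (number >> 1)
--     return line
-- ===== SOURCE B (Python) =====
-- _TR = str.maketrans('01', '.#')
--
-- def convert_number_to_line(number):
--     return format(number & 0x3FF, '010b').translate(_TR)
-- ===== Notes on version B (the rewrite author's own statement) =====
-- stated objective: idiomatic
-- what changed: Replaces A's 10-step halve-and-prepend loop with a library conversion: mask the low 10 bits once, format as a fixed-width binary string, and translate '0'/'1' to '.'/'#' with a character table.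
import Mathlib
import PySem

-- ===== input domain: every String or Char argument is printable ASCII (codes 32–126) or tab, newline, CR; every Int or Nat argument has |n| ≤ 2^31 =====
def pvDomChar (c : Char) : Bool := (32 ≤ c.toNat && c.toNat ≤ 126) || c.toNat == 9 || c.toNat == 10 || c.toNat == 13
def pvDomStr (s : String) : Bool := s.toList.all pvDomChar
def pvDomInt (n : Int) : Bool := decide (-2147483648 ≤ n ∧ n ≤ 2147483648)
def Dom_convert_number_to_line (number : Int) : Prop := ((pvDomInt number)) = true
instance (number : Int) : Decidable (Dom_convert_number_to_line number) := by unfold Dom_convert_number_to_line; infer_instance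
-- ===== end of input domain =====

-- B replaces A's halve-and-prepend loop with mask + fixed-width binary formatting + a character translation (idiomatic, not faster).

-- ===== PORT A =====
-- A: 10 iterations; each prepends '#'/'.' by the current low bit and halves `number` (Python `>> 1`).
def convert_number_to_line (number : Int) : String :=
  let st := (List.range 10).foldl
    (fun (st : List Char × Int) _ =>
      ((if PySem.Int.band st.2 1 = 1 then '#' else '.') :: st.1, st.2 >>> (1:Nat)))
    ([], number)
  String.ofList st.1

-- ===== PORT B =====
-- B: format(number & 0x3FF, '010b').translate({'0'→'.', '1'→'#'}).
-- `number & 0x3FF` is nonnegative, so `format(·, '010b')` is the base-2 digit string of a Nat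
-- (MSB first, '0' for zero), left-padded with '0' to width 10; ported with Nat.toDigits 2
-- (exact: both give the plain binary digits MSB-first, "0" for 0). translate maps each char.
def convert_number_to_line_alt (number : Int) : String :=
  let d := Nat.toDigits 2 (PySem.Int.band number 1023).toNat
  let bits := List.replicate (10 - d.length) '0' ++ d
  String.ofList (bits.map (fun c => if c = '0' then '.' else if c = '1' then '#' else c))

-- ===== PRECONDITION & SPEC =====
def Spec_convert_number_to_line (number : Int) (out : String) : Prop := out = convert_number_to_line_alt number
instance (number : Int) (out : String) : Decidable (Spec_convert_number_to_line number out) := by unfold Spec_convert_number_to_line; infer_instance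

-- ===== CLAIM (what is proved, stated in full; the proofs are below) =====
def Claim_equal_convert_number_to_line : Prop := ∀ (number : Int), Dom_convert_number_to_line number → Spec_convert_number_to_line number (convert_number_to_line number)

-- ===== LEMMAS AND PROOFS =====

-- Python `n & 1` is the floor-mod low bit, for negative n too.
theorem pv_band_one (n : Int) : PySem.Int.band n 1 = n % 2 := by
  unfold PySem.Int.band
  have h1 : n.toNat &&& 1 = n.toNat % 2 := Nat.and_one_is_mod _
  have h3 : (-n - 1).toNat &&& 1 = (-n - 1).toNat % 2 := Nat.and_one_is_mod _
  by_cases h : 0 ≤ n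
  · rw [if_pos h, if_pos (show (0:Int) ≤ 1 by norm_num),
      show Int.toNat 1 = 1 from rfl, h1]
    omega
  · rw [if_neg h, if_pos (show (0:Int) ≤ 1 by norm_num),
      show Int.toNat 1 = 1 from rfl, Nat.and_comm 1, h3]
    omega

theorem pv_shift_one (n : Int) : n >>> (1:Nat) = n / 2 := by
  simpa using Int.shiftRight_eq_div_pow n 1

-- masking a Nat with 1023 is mod 1024
theorem pv_nat_and_1023 (n : Nat) : n &&& 1023 = n % 1024 := by
  apply Nat.eq_of_testBit_eq
  intro i
  rw [Nat.testBit_and, show (1024:Nat) = 2 ^ 10 from rfl, Nat.testBit_mod_two_pow,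
    show (1023:Nat) = 2 ^ 10 - 1 from rfl, Nat.testBit_two_pow_sub_one, Bool.and_comm]

-- Python `n & 0x3FF` is the floor-mod by 1024, for negative n too
theorem pv_band_1023 (n : Int) : PySem.Int.band n 1023 = n % 1024 := by
  unfold PySem.Int.band
  have hp : (0:Int) ≤ 1023 := by norm_num
  by_cases h : 0 ≤ n
  · rw [if_pos h, if_pos hp, show Int.toNat 1023 = 1023 from rfl, pv_nat_and_1023]
    omega
  · rw [if_neg h, if_pos hp, show Int.toNat 1023 = 1023 from rfl, Nat.and_comm,
      pv_nat_and_1023]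
    omega

-- invariant of A's loop: after k steps the accumulated characters are the low k bits
-- (most significant first) and the running number is `n / 2^k`
theorem pv_loop (k : Nat) (n : Int) (acc : List Char) :
    (List.range k).foldl
      (fun (st : List Char × Int) _ =>
        ((if PySem.Int.band st.2 1 = 1 then '#' else '.') :: st.1, st.2 >>> (1:Nat)))
      (acc, n)
    = ((List.range k).reverse.map (fun j => if (n / 2^j) % 2 = 1 then '#' else '.') ++ acc,
       n / 2^k) := by
  induction k with
  | zero => simp
  | succ k ih =>
    rw [List.range_succ, List.foldl_append, ih]
    simp only [List.foldl_cons, List.foldl_nil, pv_band_one, pv_shift_one,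
      List.reverse_append,
      List.reverse_cons, List.map_append, List.map_cons, List.map_nil]
    refine Prod.ext rfl ?_
    show n / 2 ^ k / 2 = n / 2 ^ (k + 1)
    rw [pow_succ]
    have h2k : (0:Int) ≤ 2 ^ k := by positivity
    exact Int.ediv_ediv_of_nonneg h2k

-- A's output as a function of a nonnegative residue k (= n % 1024)
def pvAfun (k : Nat) : String :=
  String.ofList ((List.range 10).reverse.map
    (fun j => if ((k:Int) / 2^j) % 2 = 1 then '#' else '.'))

-- B's output as a function of the same residue
def pvBfun (k : Nat) : String :=
  let d := Nat.toDigits 2 k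
  let bits := List.replicate (10 - d.length) '0' ++ d
  String.ofList (bits.map (fun c => if c = '0' then '.' else if c = '1' then '#' else c))

-- the two residue functions agree on all 10-bit residues (finite verification)
set_option maxRecDepth 40000 in
set_option maxHeartbeats 4000000 in
theorem pv_key : ∀ k < 1024, pvAfun k = pvBfun k := by decide

-- bit j of n equals bit j of n % 1024 for j ≤ 9
theorem pv_bitmod (j : Nat) (hj : j ≤ 9) (n : Int) :
    (n / 2^j) % 2 = ((n % 1024) / 2^j) % 2 := by
  interval_cases j <;> norm_num <;> omega

-- ===== VERDICT (by name: the statement is the Claim_ definition above) =====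
theorem convert_number_to_line_spec : Claim_equal_convert_number_to_line := by
  intro number _
  show convert_number_to_line number = convert_number_to_line_alt number
  have hk : ((number % 1024).toNat : Int) = number % 1024 := by omega
  have hklt : (number % 1024).toNat < 1024 := by omega
  have hA : convert_number_to_line number = pvAfun (number % 1024).toNat := by
    simp only [convert_number_to_line, pv_loop, List.append_nil, pvAfun, hk]
    congr 1
    apply List.map_congr_left
    intro j hj
    have hj9 : j ≤ 9 := by
      have := List.mem_range.mp (List.mem_reverse.mp hj); omega
    rw [pv_bitmod j hj9]
  have hB : convert_number_to_line_alt number = pvBfun (number % 1024).toNat := by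
    simp only [convert_number_to_line_alt, pvBfun, pv_band_1023]
  rw [hA, hB, pv_key _ hklt]
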